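-- pv_equiv track=rewrite | github.com/DmitriyyLobanov/hello_python | hello_python/Task23.py | multi_couple
-- ===== SOURCE A (Python) =====
-- def multi_couple(lits_int):
--     result = []
--     while len(lits_int) > 1:
--         result.append(lits_int[0] * lits_int[-1])
--         del lits_int[0]
--         del lits_int[-1]
--         if len(lits_int) == 1: result.append(lits_int[0] ** 2)
--     return result
-- ===== SOURCE B (Python) =====
-- def multi_couple(lits_int):
--     n = len(lits_int)
--     out = [lits_int[i] * lits_int[n - 1 - i] for i in range(n // 2)]
--     if n > 1 and n % 2 == 1:
--         out.append(lits_int[n // 2] ** 2)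
--     return out
-- ===== Notes on version B (the rewrite author's own statement) =====
-- stated objective: faster
-- what changed: A repeatedly deletes the first and last element of the list (each front deletion is an O(n) shift) while pairing them; B computes the same pairs in one indexed comprehension over range(n//2) and appends the squared middle element for odd n > 1, touching the list only by O(1) index reads and never mutating it.
import Mathlib
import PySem

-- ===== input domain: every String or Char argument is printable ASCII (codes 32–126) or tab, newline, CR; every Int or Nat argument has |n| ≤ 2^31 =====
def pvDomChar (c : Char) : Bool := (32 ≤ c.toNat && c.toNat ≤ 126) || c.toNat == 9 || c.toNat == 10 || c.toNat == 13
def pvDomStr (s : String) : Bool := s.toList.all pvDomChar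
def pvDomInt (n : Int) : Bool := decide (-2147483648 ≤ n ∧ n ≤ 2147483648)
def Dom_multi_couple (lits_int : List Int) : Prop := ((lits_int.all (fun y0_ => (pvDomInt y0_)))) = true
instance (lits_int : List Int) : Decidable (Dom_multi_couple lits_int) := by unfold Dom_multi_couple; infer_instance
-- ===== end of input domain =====

-- B replaces A's O(n^2) destructive front/back deletion loop by one O(n) indexed pass
-- (pairs by index, squares the middle for odd n > 1); equivalence is about the RETURN
-- value only: Python A empties its argument list in place, B does not mutate it.

-- ===== PORT A =====
-- while len > 1: append lits[0]*lits[-1]; del lits[0]; del lits[-1]; if len == 1: append lits[0]**2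
def multiCoupleLoopA (lits result : List Int) : List Int :=
  if h : 1 < lits.length then
    let prod := PySem.List.pyGetD lits 0 0 * PySem.List.pyGetD lits (-1) 0
    let lits' := lits.tail.dropLast
    let result' := result ++ [prod]
    let result'' := if lits'.length = 1 then result' ++ [PySem.List.pyGetD lits' 0 0 ^ 2] else result'
    multiCoupleLoopA lits' result''
  else result
termination_by lits.length
decreasing_by simp [List.length_dropLast, List.length_tail]; omega

def multi_couple (lits_int : List Int) : List Int :=
  multiCoupleLoopA lits_int []

-- ===== PORT B =====
def multi_couple_alt (lits_int : List Int) : List Int :=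
  let n : Int := lits_int.length
  let out := (PySem.List.pyRange 0 (PySem.Int.floordiv n 2) 1).map
    (fun i => PySem.List.pyGetD lits_int i 0 * PySem.List.pyGetD lits_int (n - 1 - i) 0)
  if 1 < n ∧ PySem.Int.mod n 2 = 1 then
    out ++ [PySem.List.pyGetD lits_int (PySem.Int.floordiv n 2) 0 ^ 2]
  else out

-- ===== PRECONDITION & SPEC =====
def Spec_multi_couple (lits_int : List Int) (out : List Int) : Prop := out = multi_couple_alt lits_int
instance (lits_int : List Int) (out : List Int) : Decidable (Spec_multi_couple lits_int out) := by unfold Spec_multi_couple; infer_instance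

-- ===== CLAIM (what is proved, stated in full; the proofs are below) =====
def Claim_equal_multi_couple : Prop := ∀ (lits_int : List Int), Dom_multi_couple lits_int → Spec_multi_couple lits_int (multi_couple lits_int)

-- ===== LEMMAS AND PROOFS =====

-- proof skeleton: both programs equal `pairProd` (guarded for length ≤ 1)
def pairProd : List Int → List Int
  | [] => []
  | [x] => [x ^ 2]
  | a :: b :: rest => a * (b :: rest).getLast (by simp) :: pairProd ((b :: rest).dropLast)
termination_by l => l.length
decreasing_by simp [List.length_dropLast]

theorem pairProd_cons_append (a c : Int) (mid : List Int) :
    pairProd (a :: (mid ++ [c])) = a * c :: pairProd mid := by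
  cases mid with
  | nil => simp [pairProd]
  | cons b mid' =>
    show pairProd (a :: b :: (mid' ++ [c])) = _
    rw [pairProd]
    have h1 : (b :: (mid' ++ [c])).getLast (by simp) = c := by simp
    have h2 : (b :: (mid' ++ [c])).dropLast = b :: mid' := by
      rw [← List.cons_append, List.dropLast_concat]
    rw [h1, h2]

theorem loopA_step (lits result : List Int) (h : 1 < lits.length) :
  multiCoupleLoopA lits result =
    multiCoupleLoopA lits.tail.dropLast
      (if lits.tail.dropLast.length = 1
       then (result ++ [PySem.List.pyGetD lits 0 0 * PySem.List.pyGetD lits (-1) 0]) ++ [PySem.List.pyGetD lits.tail.dropLast 0 0 ^ 2]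
       else result ++ [PySem.List.pyGetD lits 0 0 * PySem.List.pyGetD lits (-1) 0]) := by
  rw [multiCoupleLoopA, dif_pos h]

theorem loopA_base (lits result : List Int) (h : ¬ 1 < lits.length) :
  multiCoupleLoopA lits result = result := by
  rw [multiCoupleLoopA, dif_neg h]

theorem loopA_eq_aux (n : Nat) (lits : List Int) (result : List Int) (hn : lits.length ≤ n) (h : 1 < lits.length) :
    multiCoupleLoopA lits result = result ++ pairProd lits := by
  induction n generalizing lits result with
  | zero => omega
  | succ n ih =>
  match lits, h with
  | a :: b :: rest, h =>
    rcases List.eq_nil_or_concat rest with rfl | ⟨rest', c, rfl⟩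
    · rw [loopA_step _ _ h]
      simp only [List.tail_cons]
      rw [show ([b] : List Int).dropLast = [] from rfl]
      rw [loopA_base _ _ (by simp)]
      have hneg1 : PySem.List.pyGetD [a, b] (-1) 0 = b := by
        rw [PySem.List.pyGetD_neg_one _ _ (by simp)]; simp
      have hp2 : pairProd [a, b] = [a * b] := by
        have h0 : pairProd ([] : List Int) = [] := by rw [pairProd]
        simpa [h0] using pairProd_cons_append a b []
      rw [if_neg (by simp), hneg1, PySem.List.pyGetD_zero_cons, hp2]
    · simp only [List.concat_eq_append] at h ⊢
      have hmid : (b :: (rest' ++ [c])).dropLast = b :: rest' := by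
        rw [← List.cons_append, List.dropLast_concat]
      have hlast : PySem.List.pyGetD (a :: b :: (rest' ++ [c])) (-1) 0 = c := by
        rw [show a :: b :: (rest' ++ [c]) = (a :: b :: rest') ++ [c] by simp]
        exact PySem.List.pyGetD_neg_one_append_singleton _ _ _
      have hpp : pairProd (a :: b :: (rest' ++ [c])) = a * c :: pairProd (b :: rest') := by
        rw [show a :: b :: (rest' ++ [c]) = a :: ((b :: rest') ++ [c]) by simp]
        exact pairProd_cons_append a c (b :: rest')
      rw [loopA_step _ _ h]
      simp only [List.tail_cons, hmid, hlast, PySem.List.pyGetD_zero_cons, hpp]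
      rcases rest' with _ | ⟨r0, rest''⟩
      · rw [if_pos (by simp), loopA_base _ _ (by simp)]
        have hp1 : pairProd [b] = [b ^ 2] := by rw [pairProd]
        simp [hp1]
      · rw [if_neg (by simp), ih _ _ (by simp at hn ⊢; omega) (by simp)]
        simp

theorem loopA_eq (lits : List Int) (result : List Int) (h : 1 < lits.length) :
    multiCoupleLoopA lits result = result ++ pairProd lits :=
  loopA_eq_aux lits.length lits result le_rfl h

def cf (l : List Int) : List Int :=
  (List.range (l.length / 2)).map (fun k => l.getD k 0 * l.getD (l.length - 1 - k) 0)
  ++ (if 1 < l.length ∧ l.length % 2 = 1 then [l.getD (l.length / 2) 0 ^ 2] else [])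

theorem altB_closed (lits : List Int) : multi_couple_alt lits = cf lits := by
  simp only [multi_couple_alt, cf]
  have h1 : PySem.Int.floordiv (lits.length : Int) 2 = ((lits.length / 2 : Nat) : Int) := by
    exact_mod_cast PySem.Int.floordiv_natCast lits.length 2
  have h2 : PySem.Int.mod (lits.length : Int) 2 = ((lits.length % 2 : Nat) : Int) := by
    exact_mod_cast PySem.Int.mod_natCast lits.length 2
  rw [h1, h2, PySem.List.pyRange_zero_natCast, List.map_map]
  have h4 : ∀ k ∈ List.range (lits.length / 2),
      PySem.List.pyGetD lits (k : Int) 0 * PySem.List.pyGetD lits ((lits.length : Int) - 1 - (k : Int)) 0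
        = lits.getD k 0 * lits.getD (lits.length - 1 - k) 0 := by
    intro k hk
    rw [List.mem_range] at hk
    have e1 : ((lits.length : Int) - 1 - (k : Int)) = ((lits.length - 1 - k : Nat) : Int) := by
      omega
    rw [e1, PySem.List.pyGetD_natCast, PySem.List.pyGetD_natCast]
  simp only [Function.comp_def]
  rw [List.map_congr_left h4]
  have h5 : ((1 : Int) < (lits.length : Int) ∧ ((lits.length % 2 : Nat) : Int) = 1)
      ↔ (1 < lits.length ∧ lits.length % 2 = 1) := by
    constructor <;> intro ⟨u, v⟩ <;> exact ⟨by exact_mod_cast u, by exact_mod_cast v⟩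
  split_ifs with hc hc' hc'
  · rw [PySem.List.pyGetD_natCast]
  · exact absurd (h5.mp hc) hc'
  · exact absurd (h5.mpr hc') hc
  · simp

theorem getD_cons_append_last (a c : Int) (mid : List Int) :
    (a :: (mid ++ [c])).getD (mid.length + 1) 0 = c := by
  rw [List.getD_cons_succ]
  simp

theorem getD_cons_append_mid (a c : Int) (mid : List Int) (k : Nat) (hk : k < mid.length) :
    (a :: (mid ++ [c])).getD (k + 1) 0 = mid.getD k 0 := by
  rw [List.getD_cons_succ]
  rw [List.getD_append _ _ _ _ hk]

theorem cf_eq_pairProd_aux : ∀ (n : Nat) (lits : List Int), lits.length ≤ n → 1 < lits.length → cf lits = pairProd lits := by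
  intro n
  induction n with
  | zero => intro lits hn h; omega
  | succ n ih =>
    intro lits hn h
    obtain ⟨a, t, rfl⟩ : ∃ a t, lits = a :: t := by
      cases lits with
      | nil => simp at h
      | cons x xs => exact ⟨x, xs, rfl⟩
    rcases List.eq_nil_or_concat t with rfl | ⟨mid, c, rfl⟩
    · simp at h
    · simp only [List.concat_eq_append] at *
      rw [pairProd_cons_append]
      have hlen : (a :: (mid ++ [c])).length = mid.length + 2 := by simp
      have hd2 : (mid.length + 2) / 2 = mid.length / 2 + 1 := by omega
      unfold cf
      rw [hlen, hd2, List.range_succ_eq_map, List.map_cons]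
      have hF0 : (a :: (mid ++ [c])).getD 0 0 * (a :: (mid ++ [c])).getD (mid.length + 2 - 1 - 0) 0 = a * c := by
        have e : mid.length + 2 - 1 - 0 = mid.length + 1 := by omega
        rw [e, List.getD_cons_zero, getD_cons_append_last]
      rw [hF0, List.map_map]
      have htail : ∀ k ∈ List.range (mid.length / 2),
          ((fun k => (a :: (mid ++ [c])).getD k 0 * (a :: (mid ++ [c])).getD (mid.length + 2 - 1 - k) 0) ∘ Nat.succ) k
            = mid.getD k 0 * mid.getD (mid.length - 1 - k) 0 := by
        intro k hk
        rw [List.mem_range] at hk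
        have hk1 : k < mid.length := by omega
        simp only [Function.comp_apply]
        have e1 : mid.length + 2 - 1 - Nat.succ k = (mid.length - 1 - k) + 1 := by omega
        rw [show (Nat.succ k) = k + 1 from rfl, getD_cons_append_mid _ _ _ _ hk1, e1,
          getD_cons_append_mid _ _ _ _ (by omega)]
      rw [List.map_congr_left htail]
      have hcond : (1 < mid.length + 2 ∧ (mid.length + 2) % 2 = 1) ↔ mid.length % 2 = 1 := by omega
      rcases Nat.lt_or_ge mid.length 2 with hm | hm
      · -- mid.length = 0 or 1: compute directly
        rcases mid with _ | ⟨x, _ | ⟨y, ys⟩⟩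
        · rw [if_neg (by simp)]
          rw [show pairProd ([] : List Int) = [] from by rw [pairProd]]
          simp
        · rw [if_pos (by simp)]
          rw [show pairProd [x] = [x ^ 2] from by rw [pairProd]]
          simp
        · simp at hm
      · -- mid.length ≥ 2: inductive hypothesis
        rw [getD_cons_append_mid a c mid (mid.length / 2) (by omega)]
        rw [← ih mid (by simp at hn; omega) (by omega)]
        unfold cf
        split_ifs with h1 h2 h2
        · rfl
        · exact absurd ⟨by omega, (hcond.mp h1)⟩ h2
        · exact absurd (hcond.mpr h2.2) h1
        · rfl

theorem altB_eq (lits : List Int) :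
    multi_couple_alt lits = if 1 < lits.length then pairProd lits else [] := by
  rw [altB_closed]
  split_ifs with h
  · exact cf_eq_pairProd_aux lits.length lits le_rfl h
  · have h0 : lits.length / 2 = 0 := by omega
    unfold cf
    rw [h0, if_neg (by intro hh; exact h hh.1)]
    simp

-- ===== VERDICT (by name: the statement is the Claim_ definition above) =====
theorem multi_couple_spec : Claim_equal_multi_couple := by
  intro lits _
  unfold Spec_multi_couple multi_couple
  rw [altB_eq]
  by_cases h : 1 < lits.length
  · rw [loopA_eq lits [] h]; simp [h]
  · rw [multiCoupleLoopA]; simp [h]
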